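-- pv_equiv track=rewrite | github.com/SoftFever/OrcaSlicer | scripts/orca_filament_lib.py | create_ordered_profile
-- ===== SOURCE A (Python) =====
-- def create_ordered_profile(profile_dict, priority_fields=['name', 'type']):
--     """Create a new dictionary with priority fields first"""
--     ordered_profile = {}
--
--     # Add priority fields first
--     for field in priority_fields:
--         if field in profile_dict:
--             ordered_profile[field] = profile_dict[field]
--
--     # Add remaining fields
--     for key, value in profile_dict.items():
--         if key not in priority_fields:
--             ordered_profile[key] = value
--
--     return ordered_profile
-- ===== SOURCE B (Python) =====
-- def create_ordered_profile(profile_dict, priority_fields=['name', 'type']):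
--     """Create a new dictionary with priority fields first"""
--     def rank(kv):
--         return priority_fields.index(kv[0]) if kv[0] in priority_fields else len(priority_fields)
--     return dict(sorted(profile_dict.items(), key=rank))
-- ===== Notes on version B (the rewrite author's own statement) =====
-- stated objective: alternative
-- what changed: Replaces A's two filtered passes (a scan of priority_fields with repeated dict lookups, then a scan of the dict skipping priority keys) by a single stable keyed sort of the items: sort profile_dict.items() by priority_fields.index(k) if k in priority_fields else len(priority_fields) and rebuild the dict; Pre_ only excludes association lists with duplicate keys, which represent no Python dict.
import Mathlib
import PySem

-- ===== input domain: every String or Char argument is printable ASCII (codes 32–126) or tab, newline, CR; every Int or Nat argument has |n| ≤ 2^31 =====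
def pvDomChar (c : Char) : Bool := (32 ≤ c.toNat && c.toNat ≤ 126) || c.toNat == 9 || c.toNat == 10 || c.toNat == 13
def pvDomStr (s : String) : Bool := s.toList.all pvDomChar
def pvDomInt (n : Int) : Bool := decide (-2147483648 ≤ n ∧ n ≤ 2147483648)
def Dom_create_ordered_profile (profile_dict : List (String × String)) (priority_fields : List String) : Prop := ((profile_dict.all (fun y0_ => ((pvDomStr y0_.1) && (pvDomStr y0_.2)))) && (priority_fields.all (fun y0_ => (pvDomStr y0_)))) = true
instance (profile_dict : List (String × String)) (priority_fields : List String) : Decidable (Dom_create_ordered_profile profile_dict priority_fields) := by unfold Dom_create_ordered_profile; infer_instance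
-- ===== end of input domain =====

-- B reorders the dict with ONE stable keyed sort of the items instead of A's two filtered passes (alternative decomposition, same exact result).

-- ===== PORT A =====
def create_ordered_profile (profile_dict : List (String × String)) (priority_fields : List String) : List (String × String) :=
  -- ordered_profile = {}; for field in priority_fields: if field in profile_dict: ordered_profile[field] = profile_dict[field]
  let d1 : PySem.Dict String String := priority_fields.foldl (fun d f =>
    match PySem.Dict.get? (PySem.Dict.mk profile_dict) f with
    | some v => d.insert f v
    | none => d) PySem.Dict.empty
  -- for key, value in profile_dict.items(): if key not in priority_fields: ordered_profile[key] = value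
  let d2 := profile_dict.foldl (fun d kv =>
    if priority_fields.contains kv.1 then d else d.insert kv.1 kv.2) d1
  d2.items

-- ===== PORT B =====
-- rank(kv) = priority_fields.index(kv[0]) if kv[0] in priority_fields else len(priority_fields)
def pvRank (priority_fields : List String) (kv : String × String) : Nat :=
  if priority_fields.contains kv.1 then (PySem.List.index? priority_fields kv.1).getD 0
  else priority_fields.length

def create_ordered_profile_alt (profile_dict : List (String × String)) (priority_fields : List String) : List (String × String) :=
  (PySem.Dict.ofList (PySem.List.sorted profile_dict (pvRank priority_fields))).items

-- ===== PRECONDITION & SPEC =====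
-- Pre_ excludes association lists with duplicate keys: a Python dict always has distinct keys, so such lists represent no input the Python programs can receive.
def Pre_create_ordered_profile (profile_dict : List (String × String)) (priority_fields : List String) : Prop :=
  (profile_dict.map Prod.fst).Nodup
instance (profile_dict : List (String × String)) (priority_fields : List String) : Decidable (Pre_create_ordered_profile profile_dict priority_fields) := by unfold Pre_create_ordered_profile; infer_instance

def pvWitness_create_ordered_profile : (List (String × String)) × List String :=
  ([("compatible_printers", "P1"), ("name", "PLA"), ("filament_type", "PLA")], ["name", "type"])

def Spec_create_ordered_profile (profile_dict : List (String × String)) (priority_fields : List String) (out : List (String × String)) : Prop := out = create_ordered_profile_alt profile_dict priority_fields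
instance (profile_dict : List (String × String)) (priority_fields : List String) (out : List (String × String)) : Decidable (Spec_create_ordered_profile profile_dict priority_fields out) := by unfold Spec_create_ordered_profile; infer_instance

-- ===== CLAIM (what is proved, stated in full; the proofs are below) =====
def Claim_equal_create_ordered_profile : Prop := ∀ (profile_dict : List (String × String)) (priority_fields : List String), Dom_create_ordered_profile profile_dict priority_fields → Pre_create_ordered_profile profile_dict priority_fields → Spec_create_ordered_profile profile_dict priority_fields (create_ordered_profile profile_dict priority_fields)

-- ===== LEMMAS AND PROOFS =====

-- first-match lookup in the association list, as A's dict lookup performs it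
def pvLook (pd : List (String × String)) (f : String) : Option String :=
  PySem.Dict.get? (PySem.Dict.mk pd) f

-- the selection A's first loop performs: walk priority_fields, emit (f, value) for the
-- first occurrence of each field present in pd; `seen` = fields already emitted
def pvSel (look : String → Option String) : List String → List String → List (String × String)
  | _, [] => []
  | seen, f :: rest =>
    match look f with
    | none => pvSel look seen rest
    | some v => if seen.contains f then pvSel look seen rest else (f, v) :: pvSel look (f :: seen) rest

theorem pvRank_lt (pf : List String) (kv : String × String) (h : pf.contains kv.1 = true) :
    pvRank pf kv < pf.length := by
  unfold pvRank
  rw [h]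
  have hm : kv.1 ∈ pf := by simpa using h
  rcases (PySem.List.index?_isSome_iff pf kv.1).2 hm |> Option.isSome_iff_exists.1 with ⟨i, hi⟩
  rw [hi]
  rcases (PySem.List.index?_eq_some_iff pf kv.1 i).1 hi with ⟨pre, suf, hpf, hlen, -⟩
  subst hpf
  simp [← hlen]

theorem pvRank_eq (pf : List String) (kv : String × String) (h : pf.contains kv.1 = false) :
    pvRank pf kv = pf.length := by
  unfold pvRank; rw [h]; rfl

theorem pvRank_le (pf : List String) (kv : String × String) : pvRank pf kv ≤ pf.length := by
  cases h : pf.contains kv.1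
  · exact le_of_eq (pvRank_eq pf kv h)
  · exact le_of_lt (pvRank_lt pf kv h)

theorem pvRank_append_mem (pf : List String) (f : String) (kv : String × String)
    (h : kv.1 ∈ pf) : pvRank (pf ++ [f]) kv = pvRank pf kv := by
  have hc : pf.contains kv.1 = true := by simpa using h
  have hc2 : (pf ++ [f]).contains kv.1 = true := by simp; exact Or.inl h
  unfold pvRank
  rw [hc, hc2, PySem.List.index?_append_of_mem _ h]
  simp

theorem pvInsertBy_append_of_before {α : Type} (before : α → α → Bool) (x : α)
    (l1 l2 : List α) (h : ∀ b ∈ l2, before x b = true) :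
    PySem.List.insertBy before x (l1 ++ l2) = PySem.List.insertBy before x l1 ++ l2 := by
  induction l1 with
  | nil =>
    cases l2 with
    | nil => rfl
    | cons b t => simp [PySem.List.insertBy, h b (by simp)]
  | cons p l1' ih =>
    by_cases hp : before x p
    · simp [PySem.List.insertBy, hp]
    · simp only [List.cons_append, PySem.List.insertBy, hp]
      simp [ih]

theorem pvSorted_snoc {α κ : Type} [LinearOrder κ] (xs : List α) (x : α) (key : α → κ) :
    PySem.List.sorted (xs ++ [x]) key =
      PySem.List.insertBy (fun a b => decide (key a < key b)) x (PySem.List.sorted xs key) := by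
  rw [PySem.List.sorted_eq_foldl_insertBy, PySem.List.sorted_eq_foldl_insertBy, List.foldl_append]
  rfl

-- the stable sort splits into the priority part followed by the untouched non-priority part
theorem pvSplit (pf : List String) (pd : List (String × String)) :
    PySem.List.sorted pd (pvRank pf) =
      PySem.List.sorted (pd.filter (fun kv => pf.contains kv.1)) (pvRank pf)
        ++ pd.filter (fun kv => !pf.contains kv.1) := by
  induction pd using List.reverseRecOn with
  | nil => rfl
  | append_singleton pd x ih =>
    rw [pvSorted_snoc, ih]
    cases hx : pf.contains x.1
    · have hne : ∀ b ∈ PySem.List.sorted (pd.filter (fun kv => pf.contains kv.1)) (pvRank pf)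
          ++ pd.filter (fun kv => !pf.contains kv.1),
          (fun a b => decide (pvRank pf a < pvRank pf b)) x b = false := by
        intro b _
        simp only [decide_eq_false_iff_not, not_lt, pvRank_eq pf x hx]
        exact pvRank_le pf b
      rw [PySem.List.insertBy_of_forall_not_before _ _ _ hne]
      have e1 : List.filter (fun kv => pf.contains kv.1) [x] = [] := by
        simp; simpa using hx
      have e2 : List.filter (fun kv => !pf.contains kv.1) [x] = [x] := by
        simp; simpa using hx
      rw [List.filter_append, List.filter_append, e1, e2, List.append_nil, List.append_assoc]
    · have hbef : ∀ b ∈ pd.filter (fun kv => !pf.contains kv.1),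
          (fun a b => decide (pvRank pf a < pvRank pf b)) x b = true := by
        intro b hb
        have hb' : pf.contains b.1 = false := by
          have := (List.mem_filter.1 hb).2; simpa using this
        simp only [decide_eq_true_eq, pvRank_eq pf b hb']
        exact pvRank_lt pf x hx
      rw [pvInsertBy_append_of_before _ _ _ _ hbef]
      have e1 : List.filter (fun kv => pf.contains kv.1) [x] = [x] := by
        simp; simpa using hx
      have e2 : List.filter (fun kv => !pf.contains kv.1) [x] = [] := by
        simp; simpa using hx
      rw [List.filter_append, List.filter_append, e1, e2, List.append_nil, pvSorted_snoc]

theorem pvSel_mem (look : String → Option String) (pf seen : List String)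
    (a : String × String) (h : a ∈ pvSel look seen pf) :
    a.1 ∈ pf ∧ look a.1 = some a.2 ∧ seen.contains a.1 = false := by
  induction pf generalizing seen with
  | nil => simp [pvSel] at h
  | cons f rest ih =>
    rw [pvSel] at h
    cases hlf : look f with
    | none =>
      rw [hlf] at h
      obtain ⟨h1, h2, h3⟩ := ih seen h
      exact ⟨List.mem_cons_of_mem _ h1, h2, h3⟩
    | some v =>
      rw [hlf] at h
      cases hs : seen.contains f with
      | true =>
        rw [hs] at h; simp only [if_true] at h
        obtain ⟨h1, h2, h3⟩ := ih seen h
        exact ⟨List.mem_cons_of_mem _ h1, h2, h3⟩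
      | false =>
        rw [hs] at h; simp only [Bool.false_eq_true, if_false] at h
        rcases List.mem_cons.1 h with rfl | h'
        · exact ⟨List.mem_cons_self, hlf, hs⟩
        · obtain ⟨h1, h2, h3⟩ := ih (f :: seen) h'
          refine ⟨List.mem_cons_of_mem _ h1, h2, ?_⟩
          simp only [List.contains_cons, Bool.or_eq_false_iff] at h3
          exact h3.2

theorem pvSel_mem_of (look : String → Option String) (pf seen : List String)
    (a : String × String) (h1 : a.1 ∈ pf) (h2 : look a.1 = some a.2)
    (h3 : seen.contains a.1 = false) : a ∈ pvSel look seen pf := by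
  induction pf generalizing seen with
  | nil => simp at h1
  | cons f rest ih =>
    rw [pvSel]
    by_cases haf : a.1 = f
    · rw [← haf, h2, ← haf] at *
      rw [h2, h3]
      simp only [Bool.false_eq_true, if_false]
      have : a = (a.1, a.2) := rfl
      rw [this]
      exact List.mem_cons_self
    · have h1' : a.1 ∈ rest := by
        rcases List.mem_cons.1 h1 with h | h
        · exact absurd h haf
        · exact h
      cases hlf : look f with
      | none => exact ih seen h1' h3
      | some v =>
        cases hs : seen.contains f with
        | true => simp only [if_true]; exact ih seen h1' h3
        | false =>
          simp only [Bool.false_eq_true, if_false]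
          refine List.mem_cons_of_mem _ (ih (f :: seen) h1' ?_)
          simp only [List.contains_cons, Bool.or_eq_false_iff]
          constructor
          · simp [beq_eq_false_iff_ne]
            exact fun hh => haf hh
          · exact h3

theorem pvSel_nodup (look : String → Option String) (pf seen : List String) :
    ((pvSel look seen pf).map Prod.fst).Nodup := by
  induction pf generalizing seen with
  | nil => simp [pvSel]
  | cons f rest ih =>
    rw [pvSel]
    cases hlf : look f with
    | none => exact ih seen
    | some v =>
      cases hs : seen.contains f with
      | true => simp only [if_true]; exact ih seen
      | false =>
        simp only [Bool.false_eq_true, if_false, List.map_cons, List.nodup_cons]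
        refine ⟨?_, ih (f :: seen)⟩
        intro hmem
        rcases List.mem_map.1 hmem with ⟨a, ha, hfst⟩
        have := (pvSel_mem look rest (f :: seen) a ha).2.2
        rw [hfst] at this
        simp at this

theorem pvSel_snoc (look : String → Option String) (pf seen : List String) (f : String) :
    pvSel look seen (pf ++ [f]) =
      pvSel look seen pf ++
        (if seen.contains f || pf.contains f then []
         else match look f with | some v => [(f, v)] | none => []) := by
  induction pf generalizing seen with
  | nil =>
    cases hlf : look f with
    | none => cases hs : seen.contains f <;> simp [pvSel, hlf, hs]
    | some v =>
      cases hs : seen.contains f <;> simp [pvSel, hlf, hs] <;> simpa using hs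
  | cons g rest ih =>
    rw [List.cons_append, pvSel, pvSel]
    cases hlg : look g with
    | none =>
      rw [ih seen]
      congr 1
      cases hlf : look f with
      | none => simp
      | some v =>
        have hgf : (g == f) = false := by
          cases hq : (g == f)
          · rfl
          · have hq' : g = f := by simpa using hq
            simp [hq', hlf] at hlg
        have hfg : (f == g) = false := by
          rw [beq_eq_false_iff_ne]
          exact fun hh => (beq_eq_false_iff_ne.1 hgf) hh.symm
        simp [List.contains_cons, hgf, hfg, beq_eq_false_iff_ne.1 hfg]
    | some w =>
      cases hs : seen.contains g with
      | true =>
        simp only [if_true]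
        rw [ih seen]
        congr 1
        by_cases hgf : g = f
        · subst hgf
          have hmem : g ∈ seen := by simpa using hs
          simp [List.contains_cons, hmem]
        · have hfg : ¬ f = g := fun hh => hgf hh.symm
          simp [List.contains_cons, hfg]
      | false =>
        simp only [Bool.false_eq_true, if_false, List.cons_append]
        rw [ih (g :: seen)]
        have hcond : ((g :: seen).contains f || rest.contains f)
            = (seen.contains f || (g :: rest).contains f) := by
          simp only [List.contains_cons]
          cases f == g <;> cases seen.contains f <;> cases rest.contains f <;> simp
        rw [hcond]

theorem pvRank_append_self (pf : List String) (f v : String) (h : f ∉ pf) :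
    pvRank (pf ++ [f]) (f, v) = pf.length := by
  have hc : (pf ++ [f]).contains f = true := by simp
  unfold pvRank
  rw [hc, PySem.List.index?_append_singleton_self pf f h]
  rfl

theorem pvSel_pairwise (look : String → Option String) (pf : List String) :
    (pvSel look [] pf).Pairwise (fun a b => pvRank pf a < pvRank pf b) := by
  induction pf using List.reverseRecOn with
  | nil => simp [pvSel]
  | append_singleton pf f ih =>
    rw [pvSel_snoc]
    rw [List.pairwise_append]
    refine ⟨?_, ?_, ?_⟩
    · refine ih.imp_of_mem ?_
      intro a b ha hb hlt
      rw [pvRank_append_mem pf f a (pvSel_mem look pf [] a ha).1,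
          pvRank_append_mem pf f b (pvSel_mem look pf [] b hb).1]
      exact hlt
    · cases hc : (List.contains [] f || pf.contains f) <;> cases hlf : look f <;>
        simp [List.pairwise_singleton]
    · intro a ha b hb
      cases hc : (List.contains [] f || pf.contains f) with
      | true => rw [hc] at hb; simp at hb
      | false =>
        rw [hc] at hb
        simp only [Bool.false_eq_true, if_false] at hb
        have hfnot : f ∉ pf := by
          have := (Bool.or_eq_false_iff.1 hc).2
          simpa using this
        cases hlf : look f with
        | none => rw [hlf] at hb; simp at hb
        | some v =>
          rw [hlf] at hb
          have hb' : b = (f, v) := by simpa using hb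
          subst hb'
          rw [pvRank_append_self pf f v hfnot,
              pvRank_append_mem pf f a (pvSel_mem look pf [] a ha).1]
          exact pvRank_lt pf a (by simpa using (pvSel_mem look pf [] a ha).1)

theorem pvLook_mem (pd : List (String × String)) (k : String) (v : String)
    (hnd : (pd.map Prod.fst).Nodup) : pvLook pd k = some v ↔ (k, v) ∈ pd := by
  induction pd with
  | nil => simp [pvLook, PySem.Dict.get?]
  | cons p rest ih =>
    rw [List.map_cons] at hnd
    have hnd2 := List.nodup_cons.1 hnd
    simp only [pvLook, PySem.Dict.get?] at ih ⊢
    by_cases hpk : p.1 = k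
    · have hb : (p.1 == k) = true := by simpa using hpk
      show (List.find? (fun q => q.1 == k) (p :: rest)).map (fun x => x.2) = some v ↔ _
      rw [List.find?_cons, hb]
      simp only [Option.map_some, Option.some.injEq]
      constructor
      · intro h
        exact List.mem_cons.2 (Or.inl (by rw [← hpk, ← h]))
      · intro h
        rcases List.mem_cons.1 h with he | hm
        · rw [← he]
        · exfalso
          apply hnd2.1
          rw [hpk]
          exact List.mem_map.2 ⟨(k, v), hm, rfl⟩
    · have hb : (p.1 == k) = false := by simpa using hpk
      show (List.find? (fun q => q.1 == k) (p :: rest)).map (fun x => x.2) = some v ↔ _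
      rw [List.find?_cons, hb]
      rw [ih hnd2.2]
      constructor
      · exact fun h => List.mem_cons_of_mem _ h
      · intro h
        rcases List.mem_cons.1 h with he | hm
        · exfalso; apply hpk; rw [← he]
        · exact hm

theorem pvInsert_noop (d : PySem.Dict String String) (k v : String)
    (h : d.contains k = true) (hv : ∀ kv ∈ d.items, kv.1 = k → kv.2 = v) :
    d.insert k v = d := by
  apply PySem.Dict.ext
  rw [PySem.Dict.items_insert_of_contains d v h]
  have hcong : ∀ p ∈ d.items, (if (p.1 == k) = true then (k, v) else p) = p := by
    intro p hp
    by_cases hpk : p.1 = k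
    · have hb : (p.1 == k) = true := by simpa using hpk
      rw [hb, if_pos rfl, ← hpk, ← hv p hp hpk]
    · have hb : (p.1 == k) = false := by simpa using hpk
      simp [hb]
  calc List.map (fun p => if (p.1 == k) = true then (k, v) else p) d.items
      = List.map id d.items := List.map_congr_left hcong
    _ = d.items := List.map_id d.items

-- A's first loop computes pvSel
theorem pvFirstLoop (pd : List (String × String)) (pf : List String)
    (d : PySem.Dict String String) (seen : List String)
    (hs : ∀ g, seen.contains g = d.contains g)
    (hv : ∀ kv ∈ d.items, pvLook pd kv.1 = some kv.2) :
    (pf.foldl (fun d f => match pvLook pd f with | some v => d.insert f v | none => d) d).items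
      = d.items ++ pvSel (pvLook pd) seen pf := by
  induction pf generalizing d seen with
  | nil => simp [pvSel]
  | cons f rest ih =>
    rw [List.foldl_cons, pvSel]
    cases hlf : pvLook pd f with
    | none =>
      simp only [hlf]
      exact ih d seen hs hv
    | some v =>
      simp only [hlf]
      cases hcf : d.contains f with
      | true =>
        have hval : ∀ kv ∈ d.items, kv.1 = f → kv.2 = v := by
          intro kv hkv he
          have := hv kv hkv
          rw [he, hlf] at this
          exact (Option.some.injEq _ _ ▸ this).symm
        rw [pvInsert_noop d f v hcf hval, ih d seen hs hv]
        have hsf : seen.contains f = true := by rw [hs f]; exact hcf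
        rw [hsf]
        simp
      | false =>
        have hs' : ∀ g, (f :: seen).contains g = (d.insert f v).contains g := by
          intro g
          rw [PySem.Dict.contains_insert]
          simp only [List.contains_cons, hs g]
        have hv' : ∀ kv ∈ (d.insert f v).items, pvLook pd kv.1 = some kv.2 := by
          intro kv hkv
          rw [PySem.Dict.items_insert_of_not_contains d v hcf] at hkv
          rcases List.mem_append.1 hkv with hm | hm
          · exact hv kv hm
          · have : kv = (f, v) := by simpa using hm
            rw [this]
            exact hlf
        rw [ih (d.insert f v) (f :: seen) hs' hv',
            PySem.Dict.items_insert_of_not_contains d v hcf]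
        have hsf : seen.contains f = false := by rw [hs f]; exact hcf
        rw [hsf]
        simp

theorem pvFoldlSkip {α β : Type} (xs : List α) (c : α → Bool) (g : β → α → β) (b : β) :
    xs.foldl (fun acc x => if c x then acc else g acc x) b
      = (xs.filter (fun x => !c x)).foldl g b := by
  induction xs generalizing b with
  | nil => rfl
  | cons x rest ih =>
    cases hc : c x <;> simp [List.filter_cons, hc, ih]

-- the priority part of the sort is exactly A's first-loop selection
theorem pvPrioPart (pd : List (String × String)) (pf : List String)
    (hnd : (pd.map Prod.fst).Nodup) :
    PySem.List.sorted (pd.filter (fun kv => pf.contains kv.1)) (pvRank pf)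
      = pvSel (pvLook pd) [] pf := by
  apply PySem.List.sorted_eq_of_perm_of_pairwise_lt _ _ (pvRank pf) ?_ (pvSel_pairwise (pvLook pd) pf)
  have hnsel : (pvSel (pvLook pd) [] pf).Nodup :=
    List.Nodup.of_map Prod.fst (pvSel_nodup (pvLook pd) pf [])
  have hnfil : (pd.filter (fun kv => pf.contains kv.1)).Nodup := by
    refine List.Nodup.of_map Prod.fst (List.Nodup.sublist ?_ hnd)
    exact List.Sublist.map Prod.fst List.filter_sublist
  rw [List.perm_ext_iff_of_nodup hnsel hnfil]
  intro a
  constructor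
  · intro ha
    obtain ⟨h1, h2, _⟩ := pvSel_mem (pvLook pd) pf [] a ha
    have hmem : a ∈ pd := by
      have := (pvLook_mem pd a.1 a.2 hnd).1 h2
      simpa using this
    exact List.mem_filter.2 ⟨hmem, by simpa using h1⟩
  · intro ha
    obtain ⟨hmem, hcont⟩ := List.mem_filter.1 ha
    refine pvSel_mem_of (pvLook pd) pf [] a (by simpa using hcont) ?_ rfl
    exact (pvLook_mem pd a.1 a.2 hnd).2 (by simpa using hmem)

theorem pvMain (pd : List (String × String)) (pf : List String)
    (hnd : (pd.map Prod.fst).Nodup) :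
    create_ordered_profile pd pf = create_ordered_profile_alt pd pf := by
  -- A side
  have e1 := pvFirstLoop pd pf PySem.Dict.empty []
    (by intro g; rfl) (by intro kv h; simp [PySem.Dict.empty] at h)
  have e1' : (pf.foldl (fun d f => match pvLook pd f with | some v => d.insert f v | none => d)
      PySem.Dict.empty).items = pvSel (pvLook pd) [] pf := by rw [e1]; rfl
  have hfresh : ∀ a ∈ pd.filter (fun kv => !pf.contains kv.1),
      (pf.foldl (fun d f => match pvLook pd f with | some v => d.insert f v | none => d)
        PySem.Dict.empty).contains a.1 = false := by
    intro a ha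
    set d1 := pf.foldl (fun d f => match pvLook pd f with | some v => d.insert f v | none => d)
      PySem.Dict.empty with hd1
    cases hc : d1.contains a.1 with
    | false => rfl
    | true =>
      exfalso
      have hk := (PySem.Dict.contains_iff_mem_keys d1 a.1).1 hc
      rw [PySem.Dict.keys, e1'] at hk
      rcases List.mem_map.1 hk with ⟨b, hb, hfst⟩
      have h1 := (pvSel_mem (pvLook pd) pf [] b hb).1
      rw [hfst] at h1
      have := (List.mem_filter.1 ha).2
      simp at this
      exact this h1
  have hnodupA : ((pd.filter (fun kv => !pf.contains kv.1)).map Prod.fst).Nodup :=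
    List.Nodup.sublist (List.Sublist.map Prod.fst List.filter_sublist) hnd
  have eA : create_ordered_profile pd pf
      = pvSel (pvLook pd) [] pf ++ pd.filter (fun kv => !pf.contains kv.1) := by
    show (pd.foldl (fun d kv => if pf.contains kv.1 then d else d.insert kv.1 kv.2)
      (pf.foldl (fun d f => match pvLook pd f with | some v => d.insert f v | none => d)
        PySem.Dict.empty)).items = _
    rw [pvFoldlSkip]
    rw [PySem.Dict.items_foldl_insert_fresh _ Prod.fst Prod.snd _ hfresh hnodupA]
    rw [e1']
    simp
  -- B side
  have hnodupB : ((PySem.List.sorted pd (pvRank pf)).map Prod.fst).Nodup := by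
    have hp : ((PySem.List.sorted pd (pvRank pf)).map Prod.fst).Perm (pd.map Prod.fst) :=
      (PySem.List.sorted_perm pd (pvRank pf) false).map Prod.fst
    exact hp.nodup_iff.2 hnd
  have eB : create_ordered_profile_alt pd pf = PySem.List.sorted pd (pvRank pf) := by
    show (PySem.Dict.empty.update (PySem.List.sorted pd (pvRank pf))).items = _
    unfold PySem.Dict.update
    rw [PySem.Dict.items_foldl_insert_fresh _ Prod.fst Prod.snd _
        (by intro a _; rfl) hnodupB]
    simp [PySem.Dict.empty]
  rw [eA, eB, pvSplit pf pd, pvPrioPart pd pf hnd]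

-- ===== VERDICT (by name: the statement is the Claim_ definition above) =====
theorem create_ordered_profile_spec : Claim_equal_create_ordered_profile := by
  intro pd pf _ hpre
  exact pvMain pd pf hpre
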